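-- pv_equiv track=rewrite | github.com/witusj/experiments-notes | sketches/functions.py | build_welch_bailey_schedule
-- ===== SOURCE A (Python) =====
-- def build_welch_bailey_schedule(N, T):
--     """
--     Build a schedule based on the Welch and Bailey (1952) heuristic.
--
--     Parameters:
--     N (int): Number of patients to be scheduled.
--     T (int): Number of time intervals in the schedule.
--
--     Returns:
--     list: A schedule of length T where each item represents the number of patients scheduled
--           at the corresponding time interval.
--     """
--     # Initialize the schedule with zeros
--     schedule = [0] * T
--
--     # Schedule the first two patients at the beginning
--     schedule[0] = 2
--     remaining_patients = N - 2
--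
--     # Distribute patients in the middle time slots with gaps
--     for t in range(1, T - 1):
--         if remaining_patients <= 0:
--             break
--         if t % 2 == 1:  # Create gaps (only schedule patients at odd time slots)
--             schedule[t] = 1
--             remaining_patients -= 1
--
--     # Push any remaining patients to the last time slot
--     schedule[-1] += remaining_patients
--
--     return schedule
-- ===== SOURCE B (Python) =====
-- def build_welch_bailey_schedule(N, T):
--     """Closed-form rebuild: compute how many odd middle slots get a patient
--     arithmetically, build the whole schedule in one comprehension, then dump
--     the leftover (possibly negative) onto the last slot."""
--     filled = min(max(N - 2, 0), (T - 1) // 2)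
--     schedule = [2 if t == 0 else (1 if t % 2 == 1 and t < 2 * filled else 0)
--                 for t in range(T)]
--     schedule[-1] += (N - 2) - filled
--     return schedule
-- ===== Notes on version B (the rewrite author's own statement) =====
-- stated objective: simpler
-- what changed: Replaces the early-break mutation loop over middle slots by a closed-form count of filled odd slots (min(max(N-2,0),(T-1)//2)) and a single comprehension building the whole schedule.
-- outside the precondition, e.g. on build_welch_bailey_schedule(5, 0): A raises IndexError, B raises IndexError
import Mathlib
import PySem

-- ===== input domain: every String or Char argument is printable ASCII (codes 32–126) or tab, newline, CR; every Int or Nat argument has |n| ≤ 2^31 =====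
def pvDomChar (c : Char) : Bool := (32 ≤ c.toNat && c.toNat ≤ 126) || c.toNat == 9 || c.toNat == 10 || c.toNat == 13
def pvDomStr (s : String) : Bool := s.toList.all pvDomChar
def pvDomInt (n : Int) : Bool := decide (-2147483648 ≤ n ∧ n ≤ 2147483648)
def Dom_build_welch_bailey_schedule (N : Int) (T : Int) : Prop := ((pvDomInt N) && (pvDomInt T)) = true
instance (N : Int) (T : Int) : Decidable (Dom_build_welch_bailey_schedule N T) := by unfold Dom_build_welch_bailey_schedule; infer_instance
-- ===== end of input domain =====

-- B rebuilds the schedule in closed form (arithmetic count of filled odd slots + one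
-- comprehension) instead of A's early-break mutation loop; objective: simpler.
-- Pre_ excludes T < 1, where Python A raises IndexError at schedule[0] = 2.
-- ===== PORT A =====
-- the middle loop of A: for t in range(1, T-1): break on remaining<=0, set odd slots
def bwLoop : List Int → List Int → Int → List Int × Int
  | [], s, r => (s, r)
  | t :: ts, s, r =>
    if r ≤ 0 then (s, r)            -- break (later iterations would not change anything)
    else if PySem.Int.mod t 2 = 1 then bwLoop ts (s.set t.toNat 1) (r - 1)
    else bwLoop ts s r

def build_welch_bailey_schedule (N : Int) (T : Int) : List Int :=
  let schedule : List Int := List.replicate T.toNat 0      -- [0] * T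
  let schedule := schedule.set 0 2                         -- schedule[0] = 2 (IndexError when T < 1, excluded by Pre_)
  let p := bwLoop (PySem.List.pyRange 1 (T - 1) 1) schedule (N - 2)
  -- schedule[-1] += remaining_patients
  (p.1).set (p.1.length - 1) ((p.1).getD (p.1.length - 1) 0 + p.2)

-- ===== PORT B =====
def build_welch_bailey_schedule_alt (N : Int) (T : Int) : List Int :=
  let filled := min (max (N - 2) 0) (PySem.Int.floordiv (T - 1) 2)
  let schedule := (List.range T.toNat).map
    (fun (t : Nat) => if t = 0 then (2 : Int) else if t % 2 = 1 ∧ (t : Int) < 2 * filled then 1 else 0)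
  -- schedule[-1] += (N - 2) - filled
  schedule.set (schedule.length - 1) (schedule.getD (schedule.length - 1) 0 + ((N - 2) - filled))

-- ===== PRECONDITION & SPEC =====
-- Pre_: Python A raises IndexError for T < 1 ([0]*T is empty); exactly those inputs are excluded.
def Pre_build_welch_bailey_schedule (N : Int) (T : Int) : Prop := 1 ≤ T
instance (N : Int) (T : Int) : Decidable (Pre_build_welch_bailey_schedule N T) := by
  unfold Pre_build_welch_bailey_schedule; infer_instance
def pvWitness_build_welch_bailey_schedule : Int × Int := (7, 6)

def Spec_build_welch_bailey_schedule (N : Int) (T : Int) (out : List Int) : Prop := out = build_welch_bailey_schedule_alt N T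
instance (N : Int) (T : Int) (out : List Int) : Decidable (Spec_build_welch_bailey_schedule N T out) := by unfold Spec_build_welch_bailey_schedule; infer_instance

-- ===== CLAIM (what is proved, stated in full; the proofs are below) =====
def Claim_equal_build_welch_bailey_schedule : Prop := ∀ (N : Int) (T : Int), Dom_build_welch_bailey_schedule N T → Pre_build_welch_bailey_schedule N T → Spec_build_welch_bailey_schedule N T (build_welch_bailey_schedule N T)

-- ===== LEMMAS AND PROOFS =====

theorem getD_set_int (l : List Int) (n : Nat) (v : Int) (i : Nat) :
    (l.set n v).getD i 0 = if i = n ∧ n < l.length then v else l.getD i 0 := by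
  simp only [List.getD_eq_getElem?_getD, List.getElem?_set]
  split_ifs with h1 h2 h3 h4 <;> simp_all

theorem bwLoop_length : ∀ (ts s : List Int) (r : Int), (bwLoop ts s r).1.length = s.length := by
  intro ts
  induction ts with
  | nil => intro s r; rfl
  | cons t ts ih =>
    intro s r
    simp only [bwLoop]
    split_ifs with h1 h2
    · rfl
    · rw [ih]; simp
    · exact ih s r

theorem bwLoop_snd : ∀ (n : Nat) (a b : Int) (r : Int) (s : List Int), (b - a).toNat = n → 0 ≤ a →
    (bwLoop (PySem.List.pyRange a b 1) s r).2 = r - max 0 (min r (b / 2 - a / 2)) := by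
  intro n
  induction n with
  | zero =>
    intro a b r s hn ha
    rw [PySem.List.pyRange_one_eq_nil (by omega)]
    simp only [bwLoop]
    omega
  | succ m ih =>
    intro a b r s hn ha
    rw [PySem.List.pyRange_one_cons (by omega)]
    simp only [bwLoop]
    split_ifs with h1 h2
    · omega
    · rw [ih (a + 1) b (r - 1) _ (by omega) (by omega)]
      rw [PySem.Int.mod_eq_emod_of_pos (by omega)] at h2
      omega
    · rw [ih (a + 1) b r _ (by omega) (by omega)]
      rw [PySem.Int.mod_eq_emod_of_pos (by omega)] at h2
      omega

theorem bwLoop_getD : ∀ (n : Nat) (a b : Int) (r : Int) (s : List Int) (i : Nat),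
    (b - a).toNat = n → 0 ≤ a →
    (∀ t : Int, a ≤ t → t < b → t.toNat < s.length) →
    (bwLoop (PySem.List.pyRange a b 1) s r).1.getD i 0 =
      if a ≤ (i : Int) ∧ (i : Int) < b ∧ i % 2 = 1 ∧ (i : Int) < 2 * r + 2 * (a / 2) + 1
      then 1 else s.getD i 0 := by
  intro n
  induction n with
  | zero =>
    intro a b r s i hn ha hb
    rw [PySem.List.pyRange_one_eq_nil (by omega)]
    simp only [bwLoop]
    rw [if_neg (by omega)]
  | succ m ih =>
    intro a b r s i hn ha hb
    rw [PySem.List.pyRange_one_cons (by omega)]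
    simp only [bwLoop]
    by_cases h1 : r ≤ 0
    · rw [if_pos h1, if_neg (by omega)]
    · rw [if_neg h1]
      by_cases h2 : PySem.Int.mod a 2 = 1
      · rw [if_pos h2]
        rw [PySem.Int.mod_eq_emod_of_pos (by omega)] at h2
        rw [ih (a + 1) b (r - 1) _ i (by omega) (by omega)
            (by intro t h3 h4; rw [List.length_set]; exact hb t (by omega) h4)]
        rw [getD_set_int]
        have hlen : a.toNat < s.length := hb a (le_refl a) (by omega)
        by_cases hia : i = a.toNat
        · rw [if_neg (by omega), if_pos (⟨hia, hlen⟩ : _ ∧ _), if_pos (by omega)]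
        · rw [if_neg (show ¬(i = a.toNat ∧ a.toNat < s.length) by omega)]
          exact if_congr (by constructor <;> intro h <;> exact ⟨by omega, h.2.1, h.2.2.1, by omega⟩) rfl rfl
      · rw [if_neg h2]
        rw [PySem.Int.mod_eq_emod_of_pos (by omega)] at h2
        rw [ih (a + 1) b r _ i (by omega) (by omega) (by intro t h3 h4; exact hb t (by omega) h4)]
        exact if_congr (by constructor <;> intro h <;> exact ⟨by omega, h.2.1, h.2.2.1, by omega⟩) rfl rfl

theorem getD_replicate_zero (n i : Nat) : (List.replicate n (0 : Int)).getD i 0 = 0 := by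
  simp only [List.getD_eq_getElem?_getD, List.getElem?_replicate]
  split <;> simp

theorem list_eq_of_getD (l1 l2 : List Int) (hlen : l1.length = l2.length)
    (h : ∀ i, l1.getD i 0 = l2.getD i 0) : l1 = l2 := by
  apply List.ext_getElem hlen
  intro i h1 h2
  have hi := h i
  rwa [List.getD_eq_getElem?_getD, List.getD_eq_getElem?_getD,
    List.getElem?_eq_getElem h1, List.getElem?_eq_getElem h2] at hi

-- ===== VERDICT (by name: the statement is the Claim_ definition above) =====
theorem build_welch_bailey_schedule_spec : Claim_equal_build_welch_bailey_schedule := by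
  intro N T _ hT
  unfold Pre_build_welch_bailey_schedule at hT
  unfold Spec_build_welch_bailey_schedule
  simp only [build_welch_bailey_schedule, build_welch_bailey_schedule_alt,
    List.length_map, List.length_range]
  rw [PySem.Int.floordiv_eq_ediv_of_pos (by omega)]
  have hs0len : ((List.replicate T.toNat (0 : Int)).set 0 2).length = T.toNat := by simp
  have hbound : ∀ t : Int, 1 ≤ t → t < T - 1 →
      t.toNat < ((List.replicate T.toNat (0 : Int)).set 0 2).length := by
    intro t h3 h4; rw [hs0len]; omega
  have hsnd := bwLoop_snd (T - 1 - 1).toNat 1 (T - 1) (N - 2)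
    ((List.replicate T.toNat (0 : Int)).set 0 2) rfl (by omega)
  have hget : ∀ i : Nat,
      (bwLoop (PySem.List.pyRange 1 (T - 1) 1)
        ((List.replicate T.toNat (0 : Int)).set 0 2) (N - 2)).1.getD i 0 =
      ((List.range T.toNat).map (fun (t : Nat) => if t = 0 then (2 : Int) else
        if t % 2 = 1 ∧ (t : Int) < 2 * min (max (N - 2) 0) ((T - 1) / 2) then 1 else 0)).getD i 0 := by
    intro i
    rw [bwLoop_getD (T - 1 - 1).toNat 1 (T - 1) (N - 2) _ i rfl (by omega) hbound]
    rw [getD_set_int, getD_replicate_zero]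
    by_cases hi : i < T.toNat
    · rw [PySem.List.getD_map_range _ _ _ _ hi]
      simp only [List.length_replicate]
      split_ifs <;> omega
    · have hout : ((List.range T.toNat).map (fun (t : Nat) => if t = 0 then (2 : Int) else
          if t % 2 = 1 ∧ (t : Int) < 2 * min (max (N - 2) 0) ((T - 1) / 2) then 1 else 0)).getD i 0
          = 0 := by
        rw [List.getD_eq_getElem?_getD, List.getElem?_eq_none (by simp; omega)]
        rfl
      rw [hout, if_neg (by omega), if_neg (by simp only [List.length_replicate]; omega)]
  have hp1 : (bwLoop (PySem.List.pyRange 1 (T - 1) 1)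
      ((List.replicate T.toNat (0 : Int)).set 0 2) (N - 2)).1 =
      (List.range T.toNat).map (fun (t : Nat) => if t = 0 then (2 : Int) else
        if t % 2 = 1 ∧ (t : Int) < 2 * min (max (N - 2) 0) ((T - 1) / 2) then 1 else 0) := by
    apply list_eq_of_getD
    · rw [bwLoop_length, hs0len]; simp
    · exact hget
  rw [hp1, hsnd]
  simp only [List.length_map, List.length_range]
  have hmm : max 0 (min (N - 2) ((T - 1) / 2 - 1 / 2)) = min (max (N - 2) 0) ((T - 1) / 2) := by
    omega
  rw [hmm]
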